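-- pv_equiv track=rewrite | github.com/WaltHuang-1412/stock | scripts/check_revenue_yoy.py | get_streak
-- ===== SOURCE A (Python) =====
-- def calc_yoy(revenues):
--     """計算每月 YoY%"""
--     monthly = {}
--     for r in revenues:
--         key = f"{r['revenue_year']}-{r['revenue_month']:02d}"
--         monthly[key] = r['revenue']
--
--     yoy = {}
--     for key, rev in monthly.items():
--         year, month = key.split('-')
--         prev_key = f"{int(year)-1}-{month}"
--         if prev_key in monthly and monthly[prev_key] > 0:
--             yoy[key] = round((rev - monthly[prev_key]) / monthly[prev_key] * 100, 1)
--     return yoy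
--
-- def get_streak(stock_id, cache):
--     """計算連續營收成長月數"""
--     if stock_id not in cache:
--         return 0
--
--     yoy = calc_yoy(cache[stock_id])
--     if not yoy:
--         return 0
--
--     streak = 0
--     for key in sorted(yoy.keys(), reverse=True):
--         if yoy[key] > 0:
--             streak += 1
--         else:
--             break
--     return streak
-- ===== SOURCE B (Python) =====
-- def get_streak(stock_id, cache):
--     """計算連續營收成長月數 — no sort: count positive-growth months above the latest non-growth month."""
--     if stock_id not in cache:
--         return 0
--
--     monthly = {}
--     for r in cache[stock_id]:
--         monthly[f"{r['revenue_year']}-{r['revenue_month']:02d}"] = r['revenue']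
--
--     grows = {}
--     for key, rev in monthly.items():
--         year, month = key.split('-')
--         prev = monthly.get(f"{int(year)-1}-{month}")
--         if prev is not None and prev > 0:
--             grows[key] = round((rev - prev) / prev * 100, 1) > 0
--
--     stoppers = [k for k, g in grows.items() if not g]
--     barrier = max(stoppers) if stoppers else None
--     return sum(1 for k, g in grows.items() if g and (barrier is None or k > barrier))
-- ===== Notes on version B (the rewrite author's own statement) =====
-- stated objective: alternative
-- what changed: B replaces A's descending sort plus break-on-first-nonpositive scan by an order-free counting algorithm: it finds the maximum month key with non-positive YoY (the barrier) and counts the positive-YoY keys lexicographically above it, so no sorted traversal or early exit exists in B.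
import Mathlib
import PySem

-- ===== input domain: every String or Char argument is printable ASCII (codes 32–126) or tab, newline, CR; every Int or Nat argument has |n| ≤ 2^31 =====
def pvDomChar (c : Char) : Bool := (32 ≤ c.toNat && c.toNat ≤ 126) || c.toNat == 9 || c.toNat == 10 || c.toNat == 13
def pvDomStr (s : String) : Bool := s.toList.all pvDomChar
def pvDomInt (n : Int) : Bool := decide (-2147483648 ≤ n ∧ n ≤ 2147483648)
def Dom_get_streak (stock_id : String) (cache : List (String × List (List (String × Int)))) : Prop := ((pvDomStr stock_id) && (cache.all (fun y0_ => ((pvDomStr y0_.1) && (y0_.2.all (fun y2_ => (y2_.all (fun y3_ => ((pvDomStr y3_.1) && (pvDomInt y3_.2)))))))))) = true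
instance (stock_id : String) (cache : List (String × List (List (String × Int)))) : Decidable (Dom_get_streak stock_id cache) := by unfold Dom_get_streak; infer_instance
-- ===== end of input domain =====

-- B replaces A's descending sort + break-on-first-nonpositive scan by an order-free count:
-- it takes the maximum non-growth month key (barrier) and counts the growth keys above it;
-- objective: alternative (no sort, no early exit).


-- ===== shared helpers (these Python lines are identical in A and in B) =====

-- r['k'] on a record dict
def pvRecord (r : List (String × Int)) (k : String) : Option Int := (PySem.Dict.mk r).get? k

-- f"{y}-{m:02d}"  (zfill gives exactly Python's 0-padded %02d for width 2)
def pvKey (y m : Int) : String :=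
  PySem.Str.join "-" [PySem.Int.toStr y, PySem.Str.zfill (PySem.Int.toStr m) 2]

-- monthly = {}; for r in revenues: monthly[f"{r['revenue_year']}-{r['revenue_month']:02d}"] = r['revenue']
-- (a missing record key is a Python KeyError — outside Pre_; that branch skips)
def pvMonthly (revenues : List (List (String × Int))) : PySem.Dict String Int :=
  revenues.foldl
    (fun monthly r =>
      match pvRecord r "revenue_year", pvRecord r "revenue_month", pvRecord r "revenue" with
      | some y, some m, some v => monthly.insert (pvKey y m) v
      | _, _, _ => monthly)
    PySem.Dict.empty

-- year, month = key.split('-'); prev_key = f"{int(year)-1}-{month}";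
-- A: 'prev_key in monthly and monthly[prev_key] > 0'; B: 'prev is not None and prev > 0' —
-- some prev exactly when that test is True
-- (a key that does not split into two pieces is a Python ValueError — outside Pre_)
def pvPrevPos (monthly : PySem.Dict String Int) (key : String) : Option Int :=
  match PySem.Str.split? key "-" with
  | some [year, month] =>
      let prevKey := PySem.Str.join "-" [PySem.Int.toStr ((PySem.Int.ofStr? year).getD 0 - 1), month]
      match monthly.get? prevKey with
      | some prev => if 0 < prev then some prev else none
      | none => none
  | _ => none

-- round((rev - prev)/prev*100, 1) > 0.  Exact on Dom (0 < prev ≤ 2^31, |rev| ≤ 2^31): the float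
-- comparison holds iff the exact rational 100*(rev-prev)/prev ≥ 1/20, i.e. 2000*(rev-prev) ≥ prev —
-- the double-rounding error is below the smallest possible nonzero distance 1/(20*2^31) of the
-- ratio from 1/20, and at exact equality CPython's rounding yields 0.1 > 0.
def pvYoyPos (rev prev : Int) : Bool := decide (prev ≤ 2000 * (rev - prev))

-- ===== PORT A =====

-- yoy = {}; for key, rev in monthly.items(): … yoy[key] = round(...)
-- (the stored float is only ever used via 'yoy[key] > 0', so the port stores that Boolean)
def calc_yoy (revenues : List (List (String × Int))) : PySem.Dict String Bool :=
  let monthly := pvMonthly revenues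
  monthly.items.foldl
    (fun yoy kv =>
      match pvPrevPos monthly kv.1 with
      | some prev => yoy.insert kv.1 (pvYoyPos kv.2 prev)
      | none => yoy)
    PySem.Dict.empty

-- for key in sorted(yoy.keys(), reverse=True): if yoy[key] > 0: streak += 1 else: break
def pvLoopA (yoy : PySem.Dict String Bool) : List String → Int → Int
  | [], streak => streak
  | k :: ks, streak => if yoy.getD k false then pvLoopA yoy ks (streak + 1) else streak

def get_streak (stock_id : String) (cache : List (String × List (List (String × Int)))) : Int :=
  match (PySem.Dict.mk cache).get? stock_id with
  | none => 0
  | some revs =>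
    let yoy := calc_yoy revs
    if yoy.items.isEmpty then 0
    else pvLoopA yoy (PySem.List.sorted yoy.keys (fun k => k) true) 0

-- ===== PORT B =====

-- grows = {}; for key, rev in monthly.items(): … grows[key] = round(...) > 0
def pvGrows (monthly : PySem.Dict String Int) : PySem.Dict String Bool :=
  monthly.items.foldl
    (fun grows kv =>
      match pvPrevPos monthly kv.1 with
      | some prev => grows.insert kv.1 (pvYoyPos kv.2 prev)
      | none => grows)
    PySem.Dict.empty

-- barrier is None or k > barrier
def pvAbv (barrier : Option String) (k : String) : Bool :=
  match barrier with
  | none => true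
  | some b => decide (b < k)

def get_streak_alt (stock_id : String) (cache : List (String × List (List (String × Int)))) : Int :=
  match (PySem.Dict.mk cache).get? stock_id with
  | none => 0
  | some revs =>
    let monthly := pvMonthly revs
    let grows := pvGrows monthly
    -- stoppers = [k for k, g in grows.items() if not g]
    let stoppers := (grows.items.filter (fun kv => !kv.2)).map (fun kv => kv.1)
    -- barrier = max(stoppers) if stoppers else None   (max? is none exactly on [])
    let barrier := PySem.List.max? stoppers (fun x => x)
    -- sum(1 for k, g in grows.items() if g and (barrier is None or k > barrier))
    ((grows.items.filter (fun kv => kv.2 && pvAbv barrier kv.1)).length : Int)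

-- ===== PRECONDITION & SPEC =====

-- the record has the three keys, and year and month are nonnegative (a negative one puts an extra
-- '-' into the key, so key.split('-') unpacks into three pieces and A raises ValueError)
def pvRecOK (r : List (String × Int)) : Bool :=
  (match pvRecord r "revenue_year" with | some y => decide (0 ≤ y) | none => false) &&
  (match pvRecord r "revenue_month" with | some m => decide (0 ≤ m) | none => false) &&
  (pvRecord r "revenue").isSome

-- Pre_ excludes exactly the inputs where A raises: a record of the selected stock missing
-- 'revenue_year'/'revenue_month'/'revenue' (KeyError) or with a negative year or month (ValueError).
def Pre_get_streak (stock_id : String) (cache : List (String × List (List (String × Int)))) : Prop :=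
  (((PySem.Dict.mk cache).get? stock_id).getD []).all pvRecOK = true
instance (stock_id : String) (cache : List (String × List (List (String × Int)))) : Decidable (Pre_get_streak stock_id cache) := by unfold Pre_get_streak; infer_instance

def pvWitness_get_streak : String × (List (String × List (List (String × Int)))) :=
  ("2330", [("2330", [[("revenue_year", 2023), ("revenue_month", 5), ("revenue", 50)],
                      [("revenue_year", 2024), ("revenue_month", 5), ("revenue", 100)]])])

def Spec_get_streak (stock_id : String) (cache : List (String × List (List (String × Int)))) (out : Int) : Prop := out = get_streak_alt stock_id cache
instance (stock_id : String) (cache : List (String × List (List (String × Int)))) (out : Int) : Decidable (Spec_get_streak stock_id cache out) := by unfold Spec_get_streak; infer_instance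

-- ===== CLAIM (what is proved, stated in full; the proofs are below) =====
def Claim_equal_get_streak : Prop := ∀ (stock_id : String) (cache : List (String × List (List (String × Int)))), Dom_get_streak stock_id cache → Pre_get_streak stock_id cache → Spec_get_streak stock_id cache (get_streak stock_id cache)

-- ===== LEMMAS AND PROOFS =====

theorem pv_witness_ok :
    Dom_get_streak pvWitness_get_streak.1 pvWitness_get_streak.2 ∧
    Pre_get_streak pvWitness_get_streak.1 pvWitness_get_streak.2 := by decide

-- B's grows dict is built by the same Python lines as A's yoy dict (only the stored value differs
-- in Python; both ports store the Boolean), so the two definitions coincide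
theorem pvGrows_eq_calc_yoy (revs : List (List (String × Int))) :
    pvGrows (pvMonthly revs) = calc_yoy revs := rfl

-- the monthly dict has unique keys
theorem pvMonthly_nodup_keys (revs : List (List (String × Int))) :
    (pvMonthly revs).keys.Nodup := by
  suffices h : ∀ (l : List (List (String × Int))) (d : PySem.Dict String Int), d.keys.Nodup →
      (l.foldl (fun monthly r =>
        match pvRecord r "revenue_year", pvRecord r "revenue_month", pvRecord r "revenue" with
        | some y, some m, some v => monthly.insert (pvKey y m) v
        | _, _, _ => monthly) d).keys.Nodup by
    exact h revs PySem.Dict.empty PySem.Dict.nodup_keys_empty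
  intro l
  induction l with
  | nil => intro d hd; simpa using hd
  | cons r t ih =>
    intro d hd
    simp only [List.foldl_cons]
    apply ih
    rcases pvRecord r "revenue_year" with _ | y <;>
      rcases pvRecord r "revenue_month" with _ | m <;>
        rcases pvRecord r "revenue" with _ | v <;>
          simp [hd, PySem.Dict.nodup_keys_insert _ _ _ hd]

-- which monthly items survive into yoy, and the value stored for them
def pvValid (monthly : PySem.Dict String Int) (k : String) : Bool :=
  (pvPrevPos monthly k).isSome

def pvVal (monthly : PySem.Dict String Int) (kv : String × Int) : Bool :=
  match pvPrevPos monthly kv.1 with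
  | some prev => pvYoyPos kv.2 prev
  | none => false

-- the yoy-building fold skips the invalid items: it is the fold over the filtered list
theorem pv_foldl_skip (monthly : PySem.Dict String Int) :
    ∀ (l : List (String × Int)) (d : PySem.Dict String Bool),
      l.foldl (fun yoy kv =>
          if pvValid monthly kv.1 then yoy.insert kv.1 (pvVal monthly kv) else yoy) d =
        (l.filter (fun kv => pvValid monthly kv.1)).foldl
          (fun yoy kv => yoy.insert kv.1 (pvVal monthly kv)) d := by
  intro l
  induction l with
  | nil => intro d; rfl
  | cons x t ih =>
    intro d
    by_cases hx : pvValid monthly x.1 = true <;> simp [hx, ih]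

-- inserting a list of distinct fresh keys from the empty dict lists exactly those items
theorem pv_items_fresh (monthly : PySem.Dict String Int) (lf : List (String × Int))
    (hndf : (lf.map (fun kv : String × Int => kv.1)).Nodup) :
    (lf.foldl (fun yoy kv => yoy.insert kv.1 (pvVal monthly kv)) PySem.Dict.empty).items =
      lf.map (fun kv => (kv.1, pvVal monthly kv)) := by
  have h := PySem.Dict.items_foldl_insert_fresh lf
    (fun kv : String × Int => kv.1) (fun kv => pvVal monthly kv)
    (PySem.Dict.empty : PySem.Dict String Bool)
    (fun a _ => PySem.Dict.contains_empty a.1) hndf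
  simpa using h

theorem calc_yoy_items (revs : List (List (String × Int))) :
    (calc_yoy revs).items =
      ((pvMonthly revs).items.filter (fun kv => pvValid (pvMonthly revs) kv.1)).map
        (fun kv => (kv.1, pvVal (pvMonthly revs) kv)) := by
  have hcy : calc_yoy revs = (pvMonthly revs).items.foldl
      (fun yoy kv =>
        match pvPrevPos (pvMonthly revs) kv.1 with
        | some prev => yoy.insert kv.1 (pvYoyPos kv.2 prev)
        | none => yoy)
      PySem.Dict.empty := rfl
  rw [hcy]
  set monthly := pvMonthly revs with hm
  have hstep : (fun (yoy : PySem.Dict String Bool) (kv : String × Int) =>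
      match pvPrevPos monthly kv.1 with
      | some prev => yoy.insert kv.1 (pvYoyPos kv.2 prev)
      | none => yoy) =
      fun yoy kv => if pvValid monthly kv.1 then yoy.insert kv.1 (pvVal monthly kv) else yoy := by
    funext yoy kv
    unfold pvValid pvVal
    rcases pvPrevPos monthly kv.1 with _ | prev <;> simp
  rw [hstep, pv_foldl_skip monthly]
  apply pv_items_fresh monthly
  have hsub : (monthly.items.filter (fun kv => pvValid monthly kv.1)).Sublist monthly.items :=
    List.filter_sublist
  exact (pvMonthly_nodup_keys revs).sublist (hsub.map (fun kv : String × Int => kv.1))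

theorem calc_yoy_keys (revs : List (List (String × Int))) :
    (calc_yoy revs).keys = (pvMonthly revs).keys.filter (pvValid (pvMonthly revs)) := by
  have h := congrArg (List.map (fun kv : String × Bool => kv.1)) (calc_yoy_items revs)
  simp only [PySem.Dict.keys, h, List.map_map]
  rw [List.filter_map]
  rfl

theorem calc_yoy_nodup_keys (revs : List (List (String × Int))) :
    (calc_yoy revs).keys.Nodup := by
  rw [calc_yoy_keys]
  exact (pvMonthly_nodup_keys revs).filter _

-- A's streak loop counts the true-prefix of the scanned keys
theorem pvLoopA_takeWhile (G : PySem.Dict String Bool) :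
    ∀ (S : List String) (s : Int),
      pvLoopA G S s = s + ((S.takeWhile (fun k => G.getD k false)).length : Int) := by
  intro S
  induction S with
  | nil => intro s; simp [pvLoopA]
  | cons k t ih =>
    intro s
    by_cases hk : G.getD k false = true
    · simp [pvLoopA, hk, ih]
      ring
    · simp [pvLoopA, hk]

-- max of a list that is a permutation of a strictly descending list is that list's head
theorem pv_max_head (l S : List String) (hperm : l.Perm S)
    (hp : S.Pairwise (fun a b => b < a)) :
    PySem.List.max? l (fun x => x) = S.head? := by
  cases S with
  | nil =>
    have hl : l = [] := hperm.eq_nil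
    simp [hl, (PySem.List.max?_eq_none_iff ([] : List String) (fun x => x)).mpr rfl]
  | cons b rest =>
    rcases h : PySem.List.max? l (fun x => x) with _ | m
    · have hl : l = [] := (PySem.List.max?_eq_none_iff l (fun x => x)).mp h
      subst hl
      exact absurd hperm.symm.eq_nil (by simp)
    · have hmem : m ∈ l := PySem.List.max?_mem h
      have hbm : b ≤ m := PySem.List.max?_isMax h b (hperm.symm.subset (by simp))
      have hmb : m ≤ b := by
        rcases List.mem_cons.mp (hperm.subset hmem) with heq | hmem'
        · exact le_of_eq heq
        · exact le_of_lt ((List.pairwise_cons.mp hp).1 m hmem')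
      simp [le_antisymm hmb hbm]

-- core: on a strictly descending list, the length of the true-prefix equals the number of
-- true elements above the first false element
theorem pv_core (f : String → Bool) :
    ∀ S : List String, S.Pairwise (fun a b => b < a) →
      (S.takeWhile f).length =
        (S.filter (fun k => f k && pvAbv ((S.filter (fun x => !f x)).head?) k)).length := by
  intro S
  induction S with
  | nil => intro _; rfl
  | cons k t ih =>
    intro hp
    have hk : ∀ x ∈ t, x < k := (List.pairwise_cons.mp hp).1
    have ht : t.Pairwise (fun a b => b < a) := (List.pairwise_cons.mp hp).2
    by_cases hf : f k = true
    · have hflt : (k :: t).filter (fun x => !f x) = t.filter (fun x => !f x) := by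
        simp [hf]
      have habv : pvAbv ((t.filter (fun x => !f x)).head?) k = true := by
        rcases hh : (t.filter (fun x => !f x)).head? with _ | b
        · rfl
        · have hb : b ∈ t := List.mem_of_mem_filter (List.mem_of_mem_head? hh)
          simp [pvAbv, hk b hb]
      rw [hflt]
      simp only [List.takeWhile_cons, hf, if_pos, List.filter_cons, habv, Bool.and_true,
        List.length_cons]
      rw [ih ht]
    · have hfk : f k = false := by simpa using hf
      have hflt : (k :: t).filter (fun x => !f x) = k :: t.filter (fun x => !f x) := by
        simp [hfk]
      have hemp : (k :: t).filter (fun x => f x && pvAbv (some k) x) = [] := by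
        rw [List.filter_eq_nil_iff]
        intro x hx
        rcases List.mem_cons.mp hx with heq | hmem
        · subst heq; simp [hfk]
        · have hxk : ¬ (k < x) := not_lt_of_gt (hk x hmem)
          simp [pvAbv, hxk]
      rw [hflt]
      simp only [List.head?_cons]
      rw [hemp]
      simp [hfk]

-- lookup in yoy agrees with the stored flag, for any listed item
theorem calc_yoy_getD_item (revs : List (List (String × Int))) (kv : String × Bool)
    (hkv : kv ∈ (calc_yoy revs).items) :
    (calc_yoy revs).getD kv.1 false = kv.2 := by
  exact PySem.Dict.getD_of_mem_items (calc_yoy revs) hkv (calc_yoy_nodup_keys revs) false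

-- ===== VERDICT (by name: the statement is the Claim_ definition above) =====
theorem get_streak_spec : Claim_equal_get_streak := by
  intro stock_id cache _ _
  unfold Spec_get_streak get_streak get_streak_alt
  rcases (PySem.Dict.mk cache).get? stock_id with _ | revs
  · rfl
  · simp only [pvGrows_eq_calc_yoy]
    set G := calc_yoy revs with hG
    set f : String → Bool := fun k => G.getD k false with hf
    -- every item's flag is f of its key
    have hitem : ∀ kv ∈ G.items, kv.2 = f kv.1 := by
      intro kv hkv
      exact (calc_yoy_getD_item revs kv hkv).symm
    -- rewrite B's two item filters through f
    have hstop : (G.items.filter (fun kv => !kv.2)).map (fun kv => kv.1) =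
        G.keys.filter (fun k => !f k) := by
      rw [List.filter_congr (fun kv hkv => by rw [hitem kv hkv])]
      show (G.items.filter ((fun k => !f k) ∘ (fun kv : String × Bool => kv.1))).map _ =
        (G.items.map (fun kv : String × Bool => kv.1)).filter (fun k => !f k)
      rw [List.filter_map]
    have hcnt : ∀ b : Option String,
        (G.items.filter (fun kv => kv.2 && pvAbv b kv.1)).length =
          (G.keys.filter (fun k => f k && pvAbv b k)).length := by
      intro b
      rw [List.filter_congr (fun kv hkv => by rw [hitem kv hkv])]
      have : G.items.filter (fun kv => f kv.1 && pvAbv b kv.1) =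
          G.items.filter ((fun k => f k && pvAbv b k) ∘ (fun kv : String × Bool => kv.1)) := rfl
      rw [this]
      show _ = ((G.items.map (fun kv : String × Bool => kv.1)).filter _).length
      rw [List.filter_map, List.length_map]
    -- the descending sorted key list
    set S := PySem.List.sorted G.keys (fun k : String => k) true with hS
    have hperm : S.Perm G.keys := PySem.List.sorted_perm _ _ _
    have hnodupS : S.Nodup := hperm.nodup_iff.mpr (calc_yoy_nodup_keys revs)
    have hge : S.Pairwise (fun a b : String => b ≤ a) := PySem.List.sorted_pairwise_rev _ _
    have hgt : S.Pairwise (fun a b : String => b < a) :=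
      (hge.and hnodupS).imp (fun h => lt_of_le_of_ne h.1 (Ne.symm h.2))
    -- barrier = head of the descending stoppers
    have hbar : PySem.List.max? (G.keys.filter (fun k => !f k)) (fun x => x) =
        (S.filter (fun x => !f x)).head? :=
      pv_max_head _ _ ((hperm.filter _).symm) (hgt.filter _)
    -- counting over keys = counting over S (same multiset)
    have hlenS : ∀ b : Option String,
        (G.keys.filter (fun k => f k && pvAbv b k)).length =
          (S.filter (fun k => f k && pvAbv b k)).length := by
      intro b
      exact (List.Perm.length_eq ((hperm.filter _))).symm
    by_cases hempty : G.items.isEmpty = true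
    · rw [if_pos hempty]
      have hitems : G.items = [] := List.isEmpty_iff.mp hempty
      simp [hitems]
    · rw [if_neg hempty]
      rw [pvLoopA_takeWhile G S 0, zero_add]
      rw [hstop, hbar, hcnt, hlenS]
      simp only [← hf]
      exact_mod_cast pv_core f S hgt
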